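-- pv_equiv track=rewrite | github.com/Suraj1199/Codeforces_Solutions | 1675B_Make_It_Increasing.py | solve
-- ===== SOURCE A (Python) =====
-- def solve(a, n):
--     ans = 0
--     for i in range(n - 2, -1, -1):
--         if a[i] < a[i + 1]:
--             continue
--         c = len(bin(a[i])) - len(bin(a[i + 1]))
--         a[i] //= 2 ** c
--         ans += c
--         if a[i] >= a[i + 1]:
--             a[i] //= 2
--             ans += 1
--         if a[i] == a[i + 1]:
--             return -1
--     return ans
-- ===== SOURCE B (Python) =====
-- def solve(a, n):
--     # Same right-to-left scan as A, but each step halves a[i] in an explicit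
--     # while-loop instead of A's len(bin()) bit-length jump; impossibility is
--     # detected when a[i] is 0 yet still >= a[i+1].
--     # Mutates a[0:n] in place, like the original.
--     ans = 0
--     for i in range(n - 2, -1, -1):
--         while a[i] >= a[i + 1]:
--             if a[i] == 0:
--                 return -1
--             a[i] //= 2
--             ans += 1
--     return ans
-- ===== Notes on version B (the rewrite author's own statement) =====
-- stated objective: simpler
-- what changed: A's per-step bit-length jump (len(bin(a[i])) - len(bin(a[i+1])), one big floor division, then a corrective halving and an equality test for -1) is replaced by a plain while-loop that halves a[i] one step at a time and reports -1 when a[i] has reached 0 but is still >= a[i+1].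
-- outside the precondition, e.g. on solve([0, -1], 2): A returns 0, B returns -1; on solve([-1, -1], 2): A returns -1, B does not finish within the time limit
import Mathlib
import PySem

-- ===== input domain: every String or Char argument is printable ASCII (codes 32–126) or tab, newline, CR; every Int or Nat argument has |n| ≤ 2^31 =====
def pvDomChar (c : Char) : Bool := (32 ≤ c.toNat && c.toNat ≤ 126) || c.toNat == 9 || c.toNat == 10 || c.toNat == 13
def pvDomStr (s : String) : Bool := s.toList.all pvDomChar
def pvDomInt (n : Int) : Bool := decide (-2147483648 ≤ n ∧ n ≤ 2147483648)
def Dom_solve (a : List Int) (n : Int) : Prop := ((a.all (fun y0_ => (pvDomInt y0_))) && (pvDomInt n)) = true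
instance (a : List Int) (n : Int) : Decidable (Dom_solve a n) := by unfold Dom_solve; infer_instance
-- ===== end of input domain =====

-- B replaces A's len(bin())-based bit-length jump with a plain one-step halving loop
-- (objective: simpler).  Both A and B mutate a[0:n] in place in Python; the claim here
-- is about the return value only.

-- ===== PORT A =====

-- len(bin(z))
def pyBinLen (z : Int) : Int := PySem.Str.len (PySem.Int.pyBin z)

-- the for-loop of A: counter k+1 handles index i = k (range(n-2, -1, -1) read via countdown)
def solveLoop (a : List Int) (ans : Int) : Nat → Int
  | 0 => ans
  | k + 1 =>
    match PySem.List.pyGet? a (k : Int), PySem.List.pyGet? a ((k : Int) + 1) with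
    | some ai, some ai1 =>
      if ai < ai1 then solveLoop a ans k
      else
        let c : Int := pyBinLen ai - pyBinLen ai1
        -- a[i] //= 2 ** c : exact for 0 ≤ c (guaranteed by Pre_: 0 ≤ a[i+1] ≤ a[i]);
        -- for c < 0 Python's 2 ** c is a float and Pre_ excludes the input
        let ai' := PySem.Int.floordiv ai ((2 : Int) ^ c.toNat)
        -- the two consecutive writes to a[i] are merged into one .set with the final value
        let ai2 := if ai' ≥ ai1 then PySem.Int.floordiv ai' 2 else ai'
        let ans2 := if ai' ≥ ai1 then ans + c + 1 else ans + c
        if ai2 = ai1 then -1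
        else solveLoop (PySem.List.pySetD a (k : Int) ai2) ans2 k
    | _, _ => 0  -- IndexError (n > len(a)); excluded by Pre_

def solve (a : List Int) (n : Int) : Int := solveLoop a 0 (n - 1).toNat

-- ===== PORT B =====

-- the while-loop of B: while a[i] >= a[i+1]: if a[i] == 0: return -1 (none); a[i] //= 2; ans += 1
-- fuel ai.toNat + 2 is enough under Pre_ (nonnegative values); it only totalises the recursion
def halveLoop : Nat → Int → Int → Int → Option (Int × Int)
  | 0, ai, _, ans => some (ai, ans)
  | fuel + 1, ai, ai1, ans =>
    if ai ≥ ai1 then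
      if ai = 0 then none
      else halveLoop fuel (PySem.Int.floordiv ai 2) ai1 (ans + 1)
    else some (ai, ans)

def solveAltLoop (a : List Int) (ans : Int) : Nat → Int
  | 0 => ans
  | k + 1 =>
    match PySem.List.pyGet? a (k : Int), PySem.List.pyGet? a ((k : Int) + 1) with
    | some ai, some ai1 =>
      match halveLoop (ai.toNat + 2) ai ai1 ans with
      | none => -1
      | some (ai2, ans2) => solveAltLoop (PySem.List.pySetD a (k : Int) ai2) ans2 k
    | _, _ => 0  -- IndexError; excluded by Pre_

def solve_alt (a : List Int) (n : Int) : Int := solveAltLoop a 0 (n - 1).toNat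

-- ===== PRECONDITION & SPEC =====

-- Pre_ excludes (i) n > len(a), where A raises IndexError, and (ii) prefixes a[0:n] with a
-- non-increasing adjacent pair whose right element is negative — the only way a negative
-- number reaches the halving step — where A's len(bin()) arithmetic yields accidental
-- results (it even stores Python floats in the list) while B's halving loop returns -1 or
-- diverges.
def Pre_solve (a : List Int) (n : Int) : Prop :=
  2 ≤ n → (n ≤ (a.length : Int) ∧
    ∀ p ∈ (a.take n.toNat).zip (a.take n.toNat).tail, p.2 ≤ p.1 → 0 ≤ p.2)
instance (a : List Int) (n : Int) : Decidable (Pre_solve a n) := by unfold Pre_solve; infer_instance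

def pvWitness_solve : List Int × Int := ([5, 3, 8, 2], 4)

def Spec_solve (a : List Int) (n : Int) (out : Int) : Prop := out = solve_alt a n
instance (a : List Int) (n : Int) (out : Int) : Decidable (Spec_solve a n out) := by unfold Spec_solve; infer_instance

-- ===== CLAIM (what is proved, stated in full; the proofs are below) =====
def Claim_equal_solve : Prop := ∀ (a : List Int) (n : Int), Dom_solve a n → Pre_solve a n → Spec_solve a n (solve a n)

-- ===== LEMMAS AND PROOFS =====

def blN (m : Nat) : Nat := PySem.Int.bitLength (m : Int)
theorem blN_zero : blN 0 = 0 := by decide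
theorem blN_succ_half (m : Nat) (hm : 0 < m) : blN m = blN (m / 2) + 1 :=
  PySem.Int.bitLength_natCast hm
theorem lt_two_pow_blN (m : Nat) : m < 2 ^ blN m := by
  have h := PySem.Int.lt_two_pow_bitLength (m : Int); simpa [blN] using h
theorem two_pow_blN_le (m : Nat) (hm : 0 < m) : 2 ^ (blN m - 1) ≤ m := by
  have h := PySem.Int.two_pow_bitLength_le (m : Int) (by exact_mod_cast hm.ne')
  simpa [blN] using h
theorem blN_pos (m : Nat) (hm : 0 < m) : 0 < blN m := by
  by_contra h
  have h0 : blN m = 0 := by omega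
  have := lt_two_pow_blN m
  rw [h0] at this; omega
theorem blN_mono {m1 m2 : Nat} (h : m1 ≤ m2) : blN m1 ≤ blN m2 := by
  rcases Nat.eq_zero_or_pos m1 with h1 | h1
  · simp [h1, blN_zero]
  · have hb1 := two_pow_blN_le m1 h1
    have hb2 := lt_two_pow_blN m2
    have h3 : 2 ^ (blN m1 - 1) < 2 ^ blN m2 := lt_of_le_of_lt (le_trans hb1 h) hb2
    have h4 := (Nat.pow_lt_pow_iff_right (by norm_num : 1 < 2)).mp h3
    have := blN_pos m1 h1
    omega
theorem blN_le_self (m : Nat) (hm : 0 < m) : blN m ≤ m := by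
  have h1 := two_pow_blN_le m hm
  have h2 : blN m - 1 < 2 ^ (blN m - 1) := Nat.lt_two_pow_self
  have := blN_pos m hm
  omega
theorem blN_div_pow (c : Nat) : ∀ (m L : Nat), 0 < L → blN m = L + c → blN (m / 2 ^ c) = L := by
  induction c with
  | zero => intro m L _ h; simpa using h
  | succ c ih =>
    intro m L hL h
    have hm : 0 < m := by
      by_contra hm
      have : m = 0 := by omega
      rw [this, blN_zero] at h; omega
    have h2 : blN (m / 2) = L + c := by
      have := blN_succ_half m hm; omega
    have := ih (m / 2) L hL h2
    rw [Nat.div_div_eq_div_mul] at this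
    simpa [Nat.pow_succ, Nat.mul_comm] using this

theorem toDigitsCore_len : ∀ (f n : Nat) (ds : List Char), n < 2 ^ f → 0 < f →
    (Nat.toDigitsCore 2 f n ds).length = max 1 (blN n) + ds.length := by
  intro f
  induction f with
  | zero => intro n ds _ hf; omega
  | succ f ih =>
    intro n ds hn _
    rw [Nat.toDigitsCore]
    by_cases h2 : n / 2 = 0
    · have hn1 : n < 2 := by omega
      have hmax : max 1 (blN n) = 1 := by
        interval_cases n
        · decide
        · decide
      simp [h2, hmax]
      omega
    · have hnn : 2 ≤ n := by omega
      have hf : 0 < f := by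
        by_contra hf
        have : f = 0 := by omega
        rw [this] at hn; omega
      have hdiv : n / 2 < 2 ^ f := by
        rw [Nat.div_lt_iff_lt_mul (by norm_num)]
        calc n < 2 ^ (f+1) := hn
        _ = 2 ^ f * 2 := by ring
      have := ih (n / 2) ((n % 2).digitChar :: ds) hdiv hf
      rw [if_neg h2, this]
      have hb1 : 0 < blN (n / 2) := blN_pos _ (by omega)
      have hb2 : blN n = blN (n / 2) + 1 := blN_succ_half n (by omega)
      simp only [List.length_cons]
      omega

theorem pyBinLen_natCast (m : Nat) : pyBinLen (m : Int) = 2 + (max 1 (blN m) : Int) := by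
  have h1 : (PySem.Int.pyBin (m : Int)).toList = PySem.Int.toBinChars0b (m : Int) :=
    PySem.Int.toList_pyBin _
  have h2 : PySem.Int.toBinChars0b (m : Int) = '0' :: 'b' :: Nat.toDigits 2 m := by
    simp [PySem.Int.toBinChars0b]
  have h3 : (Nat.toDigits 2 m).length = max 1 (blN m) := by
    have := toDigitsCore_len (m + 1) m [] (by
      calc m < 2 ^ m := Nat.lt_two_pow_self
      _ ≤ 2 ^ (m + 1) := Nat.pow_le_pow_right (by norm_num) (by omega)) (by omega)
    simpa [Nat.toDigits] using this
  simp [pyBinLen, PySem.Str.len, h1, h2, h3]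
  ring

theorem floordiv_two_natCast (m : Nat) :
    PySem.Int.floordiv (m : Int) 2 = ((m / 2 : Nat) : Int) := by
  exact_mod_cast PySem.Int.floordiv_natCast m 2

theorem halveLoop_zero : ∀ (fuel m : Nat) (ans : Int), m < fuel →
    halveLoop fuel (m : Int) 0 ans = none := by
  intro fuel
  induction fuel with
  | zero => intro m ans h; omega
  | succ fuel ih =>
    intro m ans h
    rw [halveLoop]
    rw [if_pos (by positivity)]
    by_cases hm : m = 0
    · rw [if_pos (by exact_mod_cast hm)]
    · rw [if_neg (by exact_mod_cast hm), floordiv_two_natCast]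
      exact ih (m / 2) (ans + 1) (by omega)

theorem halveLoop_pos (b : Nat) (hb : 0 < b) : ∀ (c m : Nat) (ans : Int) (fuel : Nat),
    blN m = blN b + c → c + 2 ≤ fuel →
    halveLoop fuel (m : Int) (b : Int) ans =
      (if b ≤ m / 2 ^ c then some (((m / 2 ^ c / 2 : Nat) : Int), ans + (c : Int) + 1)
       else some (((m / 2 ^ c : Nat) : Int), ans + (c : Int))) := by
  intro c
  induction c with
  | zero =>
    intro m ans fuel hbl hfuel
    obtain ⟨f, rfl⟩ : ∃ f, fuel = f + 1 := ⟨fuel - 1, by omega⟩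
    rw [halveLoop]
    by_cases hle : b ≤ m
    · rw [if_pos (by exact_mod_cast hle)]
      have hm : 0 < m := by omega
      rw [if_neg (by exact_mod_cast hm.ne'), floordiv_two_natCast]
      have hlt : m / 2 < b := by
        have h1 : blN (m / 2) = blN b - 1 := by
          have := blN_succ_half m hm
          have := blN_pos b hb
          omega
        calc m / 2 < 2 ^ blN (m / 2) := lt_two_pow_blN _
        _ = 2 ^ (blN b - 1) := by rw [h1]
        _ ≤ b := two_pow_blN_le b hb
      obtain ⟨f', rfl⟩ : ∃ f', f = f' + 1 := ⟨f - 1, by omega⟩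
      rw [halveLoop, if_neg (by exact_mod_cast Nat.not_le.mpr hlt)]
      rw [if_pos (by simpa using hle)]
      simp
    · rw [if_neg (by exact_mod_cast hle)]
      rw [if_neg (by simpa using hle)]
      simp
  | succ c ih =>
    intro m ans fuel hbl hfuel
    obtain ⟨f, rfl⟩ : ∃ f, fuel = f + 1 := ⟨fuel - 1, by omega⟩
    have hbm : blN b < blN m := by omega
    have hm : 0 < m := by
      by_contra hm
      have : m = 0 := by omega
      rw [this, blN_zero] at hbl
      have := blN_pos b hb
      omega
    have hble : b < m := by
      calc b < 2 ^ blN b := lt_two_pow_blN b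
      _ ≤ 2 ^ (blN m - 1) := Nat.pow_le_pow_right (by norm_num) (by omega)
      _ ≤ m := two_pow_blN_le m hm
    rw [halveLoop]
    rw [if_pos (by exact_mod_cast hble.le)]
    rw [if_neg (by exact_mod_cast hm.ne'), floordiv_two_natCast]
    have hbl2 : blN (m / 2) = blN b + c := by
      have := blN_succ_half m hm; omega
    rw [ih (m / 2) (ans + 1) f hbl2 (by omega)]
    have hdd : m / 2 / 2 ^ c = m / 2 ^ (c + 1) := by
      rw [Nat.div_div_eq_div_mul, pow_succ, Nat.mul_comm]
    rw [hdd]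
    split_ifs with h
    · congr 1; push_cast; ring_nf
    · congr 1; push_cast; ring_nf

theorem loops_eq : ∀ (k : Nat) (a : List Int) (ans : Int), k < a.length →
    (∀ (j : Nat) (hj : j + 1 < a.length), j < k → a[j+1] ≤ a[j] → 0 ≤ a[j+1]) →
    solveLoop a ans k = solveAltLoop a ans k := by
  intro k
  induction k with
  | zero => intro a ans _ _; rfl
  | succ k ih =>
    intro a ans hlen hR
    have hk1 : k + 1 < a.length := hlen
    have e1 : PySem.List.pyGet? a ((k : Nat) : Int) = some a[k] := by
      rw [PySem.List.pyGet?_natCast]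
      exact List.getElem?_eq_getElem (by omega)
    have e2 : PySem.List.pyGet? a (((k : Nat) : Int) + 1) = some a[k+1] := by
      have hc : (((k : Nat) : Int) + 1) = (((k + 1 : Nat)) : Int) := by push_cast; ring
      rw [hc, PySem.List.pyGet?_natCast]
      exact List.getElem?_eq_getElem hk1
    rw [solveLoop, solveAltLoop, e1, e2]
    simp only [ge_iff_le]
    by_cases hlt : a[k] < a[k+1]
    · rw [if_pos hlt]
      obtain ⟨f, hf⟩ : ∃ f, a[k].toNat + 2 = f + 1 := ⟨a[k].toNat + 1, rfl⟩
      rw [hf, halveLoop, if_neg (not_le.mpr hlt)]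
      show solveLoop a ans k = solveAltLoop (PySem.List.pySetD a ((k : Nat) : Int) a[k]) ans k
      rw [PySem.List.pySetD_natCast, List.set_getElem_self]
      exact ih a ans (by omega) (fun j hj hjk => hR j hj (by omega))
    · have hb : 0 ≤ a[k+1] := hR k hk1 (by omega) (not_lt.mp hlt)
      have hx : 0 ≤ a[k] := le_trans hb (not_lt.mp hlt)
      obtain ⟨mx, hmx⟩ : ∃ m : Nat, a[k] = (m : Int) := ⟨a[k].toNat, (Int.toNat_of_nonneg hx).symm⟩
      obtain ⟨mb, hmb⟩ : ∃ m : Nat, a[k+1] = (m : Int) := ⟨a[k+1].toNat, (Int.toNat_of_nonneg hb).symm⟩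
      have hle : mb ≤ mx := by
        have := not_lt.mp hlt
        rw [hmx, hmb] at this
        exact_mod_cast this
      have ihset : ∀ (v : Nat) (ans' : Int),
          solveLoop (a.set k ((v : Nat) : Int)) ans' k = solveAltLoop (a.set k ((v : Nat) : Int)) ans' k := by
        intro v ans'
        apply ih
        · simp; omega
        · intro j hj hjk
          have hj' : j + 1 < a.length := by simpa using hj
          simp only [List.getElem_set]
          by_cases hk : k = j + 1
          · rw [if_pos hk, if_neg (by omega : ¬ k = j)]
            exact fun _ => Int.natCast_nonneg v
          · rw [if_neg hk, if_neg (by omega : ¬ k = j)]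
            exact hR j hj' (by omega)
      rw [hmx, hmb]
      rw [if_neg (by simpa [hmx, hmb] using hlt)]
      simp only [Int.toNat_natCast]
      by_cases hb0 : mb = 0
      · subst hb0
        -- a[i+1] = 0 : A reaches a[i] = 0 = a[i+1] and returns -1; B's loop returns none
        have hc0 : pyBinLen ((mx : Nat) : Int) - pyBinLen ((0 : Nat) : Int)
            = ((max 1 (blN mx) - 1 : Nat) : Int) := by
          rw [pyBinLen_natCast, pyBinLen_natCast, blN_zero]
          have : (1:Nat) ≤ max 1 (blN mx) := le_max_left _ _
          push_cast [this]
          simp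
          omega
        rw [hc0]
        simp only [Int.toNat_natCast]
        have hy0 : PySem.Int.floordiv ((mx : Nat) : Int) ((2:Int) ^ (max 1 (blN mx) - 1))
            = ((mx / 2 ^ (max 1 (blN mx) - 1) : Nat) : Int) := by
          have h2c : ((2:Int) ^ (max 1 (blN mx) - 1)) = (((2 ^ (max 1 (blN mx) - 1) : Nat)) : Int) := by
            push_cast; ring
          rw [h2c]
          exact_mod_cast PySem.Int.floordiv_natCast mx _
        simp only [hy0]
        have hyval : mx / 2 ^ (max 1 (blN mx) - 1) / 2 = 0 := by
          rcases Nat.eq_zero_or_pos mx with h0 | h0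
          · simp [h0]
          · have hmax : max 1 (blN mx) = blN mx := max_eq_right (blN_pos mx h0)
            rw [hmax]
            have hlo : 1 ≤ mx / 2 ^ (blN mx - 1) :=
              (Nat.one_le_div_iff (by positivity)).mpr (two_pow_blN_le mx h0)
            have hhi : mx / 2 ^ (blN mx - 1) < 2 := by
              rw [Nat.div_lt_iff_lt_mul (by positivity)]
              have := lt_two_pow_blN mx
              have hp : 2 ^ blN mx = 2 ^ (blN mx - 1) * 2 := by
                rw [← pow_succ]
                congr 1
                have := blN_pos mx h0
                omega
              omega
            omega
        have hge : ((0 : Nat) : Int) ≤ ((mx / 2 ^ (max 1 (blN mx) - 1) : Nat) : Int) := by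
          exact_mod_cast Nat.zero_le _
        rw [if_pos hge, if_pos hge, floordiv_two_natCast, hyval]
        rw [if_pos (by norm_num)]
        have h0 : halveLoop (mx + 2) ((mx : Nat) : Int) (((0:Nat) : Nat) : Int) ans = none := by
          simpa using halveLoop_zero (mx + 2) mx ans (by omega)
        rw [h0]
      · have hbpos : 0 < mb := by omega
        have hxpos : 0 < mx := by omega
        have hmono := blN_mono hle
        have hbl1 : 0 < blN mb := blN_pos mb hbpos
        have hbl2 : 0 < blN mx := blN_pos mx hxpos
        set cN := blN mx - blN mb with hcN
        have hcI : pyBinLen ((mx : Nat) : Int) - pyBinLen ((mb : Nat) : Int) = ((cN : Nat) : Int) := by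
          rw [pyBinLen_natCast, pyBinLen_natCast,
            max_eq_right (by exact_mod_cast hbl2 : (1:Int) ≤ ((blN mx : Nat) : Int)),
            max_eq_right (by exact_mod_cast hbl1 : (1:Int) ≤ ((blN mb : Nat) : Int))]
          omega
        rw [hcI]
        simp only [Int.toNat_natCast]
        set y := mx / 2 ^ cN with hy
        have hyc : PySem.Int.floordiv ((mx : Nat) : Int) ((2:Int) ^ cN) = ((y : Nat) : Int) := by
          have h2c : ((2:Int) ^ cN) = (((2 ^ cN : Nat)) : Int) := by push_cast; ring
          rw [h2c]
          exact_mod_cast PySem.Int.floordiv_natCast mx _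
        simp only [hyc]
        have hbly : blN y = blN mb := blN_div_pow cN mx (blN mb) hbl1 (by omega)
        have hylt : y < 2 * mb := by
          calc y < 2 ^ blN y := lt_two_pow_blN y
          _ = 2 ^ (blN mb - 1) * 2 := by rw [hbly, ← pow_succ]; congr 1; omega
          _ ≤ mb * 2 := by
            have := two_pow_blN_le mb hbpos
            omega
          _ = 2 * mb := by ring
        have hfuel : cN + 2 ≤ mx + 2 := by
          have := blN_le_self mx hxpos
          omega
        rw [halveLoop_pos mb hbpos cN mx ans (mx + 2) (by omega) hfuel]
        by_cases hyb : mb ≤ y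
        · have hyge : ((mb : Nat) : Int) ≤ ((y : Nat) : Int) := by exact_mod_cast hyb
          have hai2 : (if ((mb : Nat) : Int) ≤ ((y : Nat) : Int) then PySem.Int.floordiv ((y : Nat) : Int) 2 else ((y : Nat) : Int)) = ((y / 2 : Nat) : Int) := by
            rw [if_pos hyge, floordiv_two_natCast]
          have hans2 : (if ((mb : Nat) : Int) ≤ ((y : Nat) : Int) then ans + ((cN : Nat) : Int) + 1 else ans + ((cN : Nat) : Int)) = ans + ((cN : Nat) : Int) + 1 := if_pos hyge
          have hne : ((y / 2 : Nat) : Int) ≠ ((mb : Nat) : Int) := by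
            have : y / 2 < mb := by omega
            exact_mod_cast this.ne
          rw [hai2, hans2, if_neg hne, if_pos hyb]
          show solveLoop (PySem.List.pySetD a ((k:Nat):Int) ((y / 2 : Nat) : Int)) (ans + ((cN : Nat) : Int) + 1) k
              = solveAltLoop (PySem.List.pySetD a ((k:Nat):Int) ((mx / 2 ^ cN / 2 : Nat) : Int)) (ans + ((cN : Nat) : Int) + 1) k
          rw [← hy, PySem.List.pySetD_natCast]
          exact ihset (y / 2) _
        · have hyge : ¬ (((mb : Nat) : Int) ≤ ((y : Nat) : Int)) := by exact_mod_cast hyb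
          have hai2 : (if ((mb : Nat) : Int) ≤ ((y : Nat) : Int) then PySem.Int.floordiv ((y : Nat) : Int) 2 else ((y : Nat) : Int)) = ((y : Nat) : Int) := if_neg hyge
          have hans2 : (if ((mb : Nat) : Int) ≤ ((y : Nat) : Int) then ans + ((cN : Nat) : Int) + 1 else ans + ((cN : Nat) : Int)) = ans + ((cN : Nat) : Int) := if_neg hyge
          have hne : ((y : Nat) : Int) ≠ ((mb : Nat) : Int) := by
            have : y < mb := by omega
            exact_mod_cast this.ne
          rw [hai2, hans2, if_neg hne, if_neg hyb]
          show solveLoop (PySem.List.pySetD a ((k:Nat):Int) ((y : Nat) : Int)) (ans + ((cN : Nat) : Int)) k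
              = solveAltLoop (PySem.List.pySetD a ((k:Nat):Int) ((mx / 2 ^ cN : Nat) : Int)) (ans + ((cN : Nat) : Int)) k
          rw [← hy, PySem.List.pySetD_natCast]
          exact ihset y _

-- ===== VERDICT (by name: the statement is the Claim_ definition above) =====
theorem solve_spec : Claim_equal_solve := by
  intro a n _ hpre
  unfold Spec_solve solve solve_alt
  by_cases h2 : 2 ≤ n
  · obtain ⟨hlen, hz⟩ := hpre h2
    have hlen' : n.toNat ≤ a.length := by omega
    apply loops_eq
    · have : ((n - 1).toNat : Int) < (a.length : Int) := by
        rw [Int.toNat_of_nonneg (by omega)]; omega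
      exact_mod_cast this
    · intro j hj hjk
      have hjn : j + 1 < n.toNat := by omega
      have hjz : j < ((a.take n.toNat).zip (a.take n.toNat).tail).length := by
        simp only [List.length_zip, List.length_tail, List.length_take]
        omega
      have hpair : ((a.take n.toNat).zip (a.take n.toNat).tail)[j] = (a[j], a[j+1]) := by
        rw [List.getElem_zip]
        congr 1
        · exact List.getElem_take
        · rw [List.getElem_tail]
          exact List.getElem_take
      have hmem : ((a[j], a[j+1]) : Int × Int) ∈ (a.take n.toNat).zip (a.take n.toNat).tail := by
        rw [← hpair]
        exact List.getElem_mem _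
      exact hz _ hmem
  · have h0 : (n - 1).toNat = 0 := by omega
    rw [h0]
    rfl
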